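-- pv_equiv track=rewrite | github.com/eliezersegall/advent-of-code-2020 | AdventOfCode_2020_puzzle_day_11.py | right_check
-- ===== SOURCE A (Python) =====
-- def right_check(i_input, j_input, input_puzzle):
--     right = 'v'
--     for r in range(j_input + 1, len(input_puzzle[0])):
--         if input_puzzle[i_input][r] == '#':
--             right = 'x'
--             break
--         elif input_puzzle[i_input][r] == 'L':
--             break
--     if right == 'v':
--         return True
--     else:
--         return False
-- ===== SOURCE B (Python) =====
-- def right_check(i_input, j_input, input_puzzle):
--     res = True
--     for c in reversed(input_puzzle[i_input][j_input + 1:]):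
--         if c == '#':
--             res = False
--         elif c == 'L':
--             res = True
--     return res
-- ===== Notes on version B (the rewrite author's own statement) =====
-- stated objective: alternative
-- what changed: Replaces A's early-breaking left-to-right scan with a full right-to-left fold over the reversed slice: an accumulator records whether the seat in view is unoccupied, and since the leftmost seat character is processed last its update wins, making the break unnecessary.
-- outside the precondition, e.g. on right_check(0, -3, ['#..']): A returns False, B returns True; on right_check(1, 1, ['..', '..#']): A returns True, B returns False
import Mathlib
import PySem

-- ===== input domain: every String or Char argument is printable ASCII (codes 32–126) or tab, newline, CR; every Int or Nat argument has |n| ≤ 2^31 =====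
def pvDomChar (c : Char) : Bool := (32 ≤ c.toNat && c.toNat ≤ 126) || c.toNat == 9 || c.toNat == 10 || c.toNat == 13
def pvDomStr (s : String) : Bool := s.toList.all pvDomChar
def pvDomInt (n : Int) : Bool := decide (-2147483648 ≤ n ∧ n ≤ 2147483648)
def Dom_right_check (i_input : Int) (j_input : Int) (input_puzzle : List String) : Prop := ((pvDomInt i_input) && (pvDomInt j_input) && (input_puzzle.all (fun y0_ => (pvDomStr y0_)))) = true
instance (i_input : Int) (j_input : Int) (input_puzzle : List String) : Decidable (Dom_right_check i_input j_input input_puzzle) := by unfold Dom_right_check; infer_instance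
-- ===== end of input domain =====

-- B replaces A's early-breaking left-to-right scan with a right-to-left fold over the reversed
-- slice; the leftmost seat's accumulator update is applied last, so it wins (objective: alternative).

-- ===== PORT A =====
-- the loop 'for r in range(j_input+1, len(input_puzzle[0])): …' with its two breaks
def rcLoop (i_input : Int) (input_puzzle : List String) (rs : List Int) : String :=
  match rs with
  | [] => "v"
  | r :: rest =>
    if ((PySem.List.pyGet? input_puzzle i_input).bind (fun row => PySem.Str.pyGet? row r)) = some '#' then "x"
    else if ((PySem.List.pyGet? input_puzzle i_input).bind (fun row => PySem.Str.pyGet? row r)) = some 'L' then "v"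
    else rcLoop i_input input_puzzle rest

def right_check (i_input : Int) (j_input : Int) (input_puzzle : List String) : Bool :=
  let n := PySem.Str.len ((PySem.List.pyGet? input_puzzle 0).getD "")  -- len(input_puzzle[0]); Pre_ excludes the empty-list IndexError
  let right := rcLoop i_input input_puzzle (PySem.List.pyRange (j_input + 1) n 1)
  if right = "v" then true else false

-- ===== PORT B =====
-- the body of 'for c in reversed(...): if c == '#': res = False elif c == 'L': res = True'
def rcStep (res : Bool) (c : Char) : Bool :=
  if c = '#' then false else if c = 'L' then true else res

def right_check_alt (i_input : Int) (j_input : Int) (input_puzzle : List String) : Bool :=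
  let sub := PySem.Str.slice ((PySem.List.pyGet? input_puzzle i_input).getD "") (some (j_input + 1)) none
  sub.toList.reverse.foldl rcStep true

-- ===== PRECONDITION & SPEC =====
-- Pre_ excludes inputs where A raises (empty list, row index outside wrap range, the scan running
-- off the end of a short seatless indexed row) and corners where A returns an accidental value B
-- need not match: scans whose first visible seat is reached only through A's negative-index
-- wraparound re-reading the row, or, on a ragged indexed row, only beyond row 0's length (A
-- silently truncates its scan there); the natural domain is a grid scan from column j_input+1.
def Pre_right_check (i_input : Int) (j_input : Int) (input_puzzle : List String) : Prop :=
  input_puzzle ≠ [] ∧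
  (-(input_puzzle.length : Int) ≤ i_input ∧ i_input < (input_puzzle.length : Int)) ∧
  (let row := PySem.List.pyGetD input_puzzle i_input "";
   let n0 := PySem.Str.len (PySem.List.pyGetD input_puzzle 0 "");
   (0 ≤ j_input + 1 ∧
     (let s := row.toList.drop (j_input + 1).toNat;
      let cut := s.take (n0 - (j_input + 1)).toNat;
      ('#' ∈ cut ∨ 'L' ∈ cut) ∨
      (('#' ∉ s ∧ 'L' ∉ s) ∧ (n0 ≤ PySem.Str.len row ∨ n0 ≤ j_input + 1)))) ∨
   (j_input + 1 < 0 ∧ -(PySem.Str.len row) ≤ j_input + 1 ∧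
     (let w := row.toList.drop (PySem.Str.len row + (j_input + 1)).toNat;
      let t := row.toList.take n0.toNat;
      ('#' ∈ w ∨ 'L' ∈ w) ∨
      (('#' ∉ t ∧ 'L' ∉ t) ∧ n0 ≤ PySem.Str.len row))))
instance (i_input : Int) (j_input : Int) (input_puzzle : List String) : Decidable (Pre_right_check i_input j_input input_puzzle) := by unfold Pre_right_check; infer_instance

def pvWitness_right_check : Int × Int × List String := (0, 0, ["#L."])

def Spec_right_check (i_input : Int) (j_input : Int) (input_puzzle : List String) (out : Bool) : Prop := out = right_check_alt i_input j_input input_puzzle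
instance (i_input : Int) (j_input : Int) (input_puzzle : List String) (out : Bool) : Decidable (Spec_right_check i_input j_input input_puzzle out) := by unfold Spec_right_check; infer_instance

-- ===== CLAIM (what is proved, stated in full; the proofs are below) =====
def Claim_equal_right_check : Prop := ∀ (i_input : Int) (j_input : Int) (input_puzzle : List String), Dom_right_check i_input j_input input_puzzle → Pre_right_check i_input j_input input_puzzle → Spec_right_check i_input j_input input_puzzle (right_check i_input j_input input_puzzle)

-- ===== LEMMAS AND PROOFS =====

-- A's loop over the characters themselves
def loopChars (l : List Char) : String :=
  match l with
  | [] => "v"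
  | c :: cs => if c = '#' then "x" else if c = 'L' then "v" else loopChars cs

-- A's early-breaking left-to-right scan agrees with B's right-to-left fold:
-- the leftmost seat character's update is applied last, so it determines the fold's value
lemma loopChars_foldl_reverse (l : List Char) :
    (if loopChars l = "v" then true else false) = l.reverse.foldl rcStep true := by
  rw [List.foldl_reverse]
  induction l with
  | nil => rfl
  | cons c cs ih =>
    rw [List.foldr_cons]
    by_cases h1 : c = '#'
    · simp [loopChars, rcStep, h1]
    · by_cases h2 : c = 'L'
      · simp [loopChars, rcStep, h2]
      · simp only [loopChars, rcStep, if_neg h1, if_neg h2]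
        exact ih

-- A's index loop over range(a, b) equals the character loop on the corresponding row segment
-- (clamped: past the row's end the port reads none and scans on to b)
lemma rcLoop_eq (i : Int) (ipz : List String) (row : String) (b : Int)
    (hrow : PySem.List.pyGet? ipz i = some row) :
    ∀ (m : Nat) (a : Int), 0 ≤ a → (b - a).toNat = m →
      rcLoop i ipz (PySem.List.pyRange a b 1)
        = loopChars ((row.toList.drop a.toNat).take (b - a).toNat) := by
  intro m
  induction m with
  | zero =>
    intro a ha hm
    rw [PySem.List.pyRange_one_eq_nil (by omega), hm, List.take_zero]
    rfl
  | succ m ih =>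
    intro a ha hm
    have hlt : a < b := by omega
    rw [PySem.List.pyRange_one_cons hlt]
    have hm1 : (b - (a + 1)).toNat = m := by omega
    by_cases hin : a < (row.toList.length : Int)
    · have hget : PySem.Str.pyGet? row a = some row.toList[a.toNat] := by
        rw [show PySem.Str.pyGet? row a = PySem.List.pyGet? row.toList a by
          simp [PySem.Str.pyGet?_eq, PySem.Chars.pyGet?_eq_listPyGet?]]
        exact PySem.List.pyGet?_eq_some_getElem row.toList ha (by omega)
      have hdrop : row.toList.drop a.toNat
          = row.toList[a.toNat] :: row.toList.drop (a.toNat + 1) :=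
        (List.getElem_cons_drop (by omega)).symm
      rw [hdrop, hm, List.take_succ_cons]
      simp only [rcLoop, hrow, Option.bind_some, hget, loopChars, Option.some.injEq]
      by_cases hc1 : row.toList[a.toNat] = '#'
      · simp [hc1]
      · by_cases hc2 : row.toList[a.toNat] = 'L'
        · simp [hc2]
        · simp only [if_neg hc1, if_neg hc2]
          have := ih (a + 1) (by omega) hm1
          rw [show (a + 1).toNat = a.toNat + 1 by omega, hm1] at this
          exact this
    · have hget : PySem.Str.pyGet? row a = none := by
        rw [show PySem.Str.pyGet? row a = PySem.List.pyGet? row.toList a by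
          simp [PySem.Str.pyGet?_eq, PySem.Chars.pyGet?_eq_listPyGet?]]
        rw [PySem.List.pyGet?_eq_none_iff]
        intro hr
        have := hr.2
        omega
      have hnil : row.toList.drop a.toNat = [] := List.drop_of_length_le (by omega)
      have hnil' : row.toList.drop (a + 1).toNat = [] := List.drop_of_length_le (by omega)
      simp only [rcLoop, hrow, Option.bind_some, hget]
      rw [if_neg (by simp), if_neg (by simp)]
      rw [ih (a + 1) (by omega) hm1, hnil, hnil', List.take_nil, List.take_nil]

-- truncating the scanned list does not change the verdict when the truncation keeps a seat
-- or the whole list has none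
lemma loopChars_take (l : List Char) (k : Nat)
    (h : ('#' ∈ l.take k ∨ 'L' ∈ l.take k) ∨ ('#' ∉ l ∧ 'L' ∉ l)) :
    loopChars (l.take k) = loopChars l := by
  induction l generalizing k with
  | nil => rw [List.take_nil]
  | cons c cs ih =>
    cases k with
    | zero =>
      rw [List.take_zero]
      rcases h with h | h
      · simp at h
      · have hc1 : c ≠ '#' := fun hc => h.1 (by rw [← hc] at h ⊢; exact List.mem_cons_self)
        have hc2 : c ≠ 'L' := fun hc => h.2 (by rw [← hc] at h ⊢; exact List.mem_cons_self)
        rw [show loopChars (c :: cs) = loopChars cs by simp [loopChars, hc1, hc2]]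
        rw [← List.take_zero (l := cs)]
        exact ih 0 (Or.inr ⟨fun hm => h.1 (List.mem_cons_of_mem c hm),
          fun hm => h.2 (List.mem_cons_of_mem c hm)⟩)
    | succ k =>
      rw [List.take_succ_cons]
      by_cases hc1 : c = '#'
      · simp [loopChars, hc1]
      · by_cases hc2 : c = 'L'
        · simp [loopChars, hc2]
        · simp only [loopChars, if_neg hc1, if_neg hc2]
          apply ih
          rcases h with (h | h) | h
          · rcases List.mem_cons.mp h with h' | h'
            · exact absurd h'.symm hc1
            · exact Or.inl (Or.inl h')
          · rcases List.mem_cons.mp h with h' | h'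
            · exact absurd h'.symm hc2
            · exact Or.inl (Or.inr h')
          · exact Or.inr ⟨fun hm => h.1 (List.mem_cons_of_mem c hm),
              fun hm => h.2 (List.mem_cons_of_mem c hm)⟩

-- a seatless list scans to the harmless verdict
lemma loopChars_noseat (l : List Char) (h1 : '#' ∉ l) (h2 : 'L' ∉ l) :
    loopChars l = "v" := by
  induction l with
  | nil => rfl
  | cons c cs ih =>
    have hc1 : c ≠ '#' := fun hc => h1 (hc ▸ List.mem_cons_self)
    have hc2 : c ≠ 'L' := fun hc => h2 (hc ▸ List.mem_cons_self)
    rw [show loopChars (c :: cs) = loopChars cs by simp [loopChars, hc1, hc2]]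
    exact ih (fun hm => h1 (List.mem_cons_of_mem c hm)) (fun hm => h2 (List.mem_cons_of_mem c hm))

-- appending further cells does not change the verdict when the first part keeps a seat
-- or the appended part has none
lemma loopChars_append (w t : List Char)
    (h : ('#' ∈ w ∨ 'L' ∈ w) ∨ ('#' ∉ t ∧ 'L' ∉ t)) :
    loopChars (w ++ t) = loopChars w := by
  induction w with
  | nil =>
    rcases h with h | h
    · simp at h
    · rw [List.nil_append]
      exact loopChars_noseat t h.1 h.2
  | cons c cs ih =>
    rw [List.cons_append]
    by_cases hc1 : c = '#'
    · simp [loopChars, hc1]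
    · by_cases hc2 : c = 'L'
      · simp [loopChars, hc2]
      · simp only [loopChars, if_neg hc1, if_neg hc2]
        apply ih
        rcases h with (h | h) | h
        · rcases List.mem_cons.mp h with h' | h'
          · exact absurd h'.symm hc1
          · exact Or.inl (Or.inl h')
        · rcases List.mem_cons.mp h with h' | h'
          · exact absurd h'.symm hc2
          · exact Or.inl (Or.inr h')
        · exact Or.inr h

-- A's loop started at a NEGATIVE column a wraps: it visits the row's last -a cells, then
-- (if no seat stopped it) the row again from column 0 up to b
lemma rcLoop_eq_neg (i : Int) (ipz : List String) (row : String) (b : Int) (hb : 0 ≤ b)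
    (hrow : PySem.List.pyGet? ipz i = some row) :
    ∀ (m : Nat) (a : Int), -(row.toList.length : Int) ≤ a → a < 0 → (0 - a).toNat = m →
      rcLoop i ipz (PySem.List.pyRange a b 1)
        = loopChars (row.toList.drop ((row.toList.length : Int) + a).toNat
            ++ row.toList.take b.toNat) := by
  intro m
  induction m with
  | zero => intro a _ ha0 hm; omega
  | succ m ih =>
    intro a halo ha0 hm
    have hlt : a < b := by omega
    rw [PySem.List.pyRange_one_cons hlt]
    have hidx : ((row.toList.length : Int) + a).toNat < row.toList.length := by omega
    have hget : PySem.Str.pyGet? row a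
        = some row.toList[((row.toList.length : Int) + a).toNat] := by
      rw [show PySem.Str.pyGet? row a = PySem.List.pyGet? row.toList a by
        simp [PySem.Str.pyGet?_eq, PySem.Chars.pyGet?_eq_listPyGet?]]
      have h' := PySem.List.pyGet?_neg_natCast row.toList (-a).toNat (by omega) (by omega)
      rw [show -(((-a).toNat : Nat) : Int) = a by omega] at h'
      rw [h', show row.toList.length - (-a).toNat
        = ((row.toList.length : Int) + a).toNat by omega]
      exact List.getElem?_eq_getElem hidx
    have hdrop : row.toList.drop ((row.toList.length : Int) + a).toNat
        = row.toList[((row.toList.length : Int) + a).toNat]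
            :: row.toList.drop (((row.toList.length : Int) + a).toNat + 1) :=
      (List.getElem_cons_drop hidx).symm
    rw [hdrop, List.cons_append]
    simp only [rcLoop, hrow, Option.bind_some, hget, loopChars, Option.some.injEq]
    have hh : row.toList.length = row.length := by simp [String.length_toList]
    split_ifs with hc1 hc2
    · rfl
    · rfl
    · by_cases hstop : a + 1 < 0
      · have := ih (a + 1) (by omega) hstop (by omega)
        rw [show ((row.toList.length : Int) + (a + 1)).toNat
            = ((row.toList.length : Int) + a).toNat + 1 by omega] at this
        simpa [String.length_toList] using this
      · have ha1 : a + 1 = 0 := by omega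
        rw [ha1, rcLoop_eq i ipz row b hrow (b - 0).toNat 0 le_rfl rfl]
        rw [show ((row.toList.length : Int) + a).toNat + 1 = row.toList.length by omega,
          List.drop_length, List.nil_append]
        simp

-- ===== VERDICT (by name: the statement is the Claim_ definition above) =====
theorem right_check_spec : Claim_equal_right_check := by
  intro i j ipz _ hpre
  obtain ⟨hne, ⟨hlo, hhi⟩, hcond⟩ := hpre
  obtain ⟨r0, rest, rfl⟩ : ∃ r0 rest, ipz = r0 :: rest := by
    cases ipz with
    | nil => exact absurd rfl hne
    | cons r0 rest => exact ⟨r0, rest, rfl⟩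
  have h0 : PySem.List.pyGet? (r0 :: rest) (0 : Int) = some r0 :=
    PySem.List.pyGet?_zero_cons r0 rest
  have key : ∃ row, PySem.List.pyGet? (r0 :: rest) i = some row ∧
      PySem.List.pyGetD (r0 :: rest) i "" = row := by
    by_cases hi : 0 ≤ i
    · exact ⟨(r0 :: rest)[i.toNat], PySem.List.pyGet?_eq_some_getElem _ hi hhi,
        PySem.List.pyGetD_eq_getElem _ _ hi hhi⟩
    · have hik : i = -(((-i).toNat : Nat) : Int) := by omega
      rw [hik, PySem.List.pyGet?_neg_natCast _ _ (by omega) (by omega),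
        PySem.List.pyGetD_neg_natCast _ _ _ (by omega) (by omega)]
      exact ⟨_, List.getElem?_eq_getElem (by omega), rfl⟩
  obtain ⟨row, hrow, hrowD⟩ := key
  have hD0 : PySem.List.pyGetD (r0 :: rest) (0 : Int) "" = r0 :=
    PySem.List.pyGetD_zero_cons r0 rest ""
  simp only [hrowD, hD0] at hcond
  have hlenrow : PySem.Str.len row = (row.toList.length : Int) := by
    rw [PySem.Str.len_eq]
  have hlen0 : (0 : Int) ≤ PySem.Str.len r0 := by
    rw [PySem.Str.len_eq]
    exact_mod_cast Nat.zero_le _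
  unfold Spec_right_check right_check right_check_alt
  simp only [h0, hrow, Option.getD_some]
  have hsub0 : ∀ k : Nat, (PySem.Str.slice row (some (j + 1)) none).toList
      = row.toList.drop k →
      ((if loopChars (row.toList.drop k) = "v" then true else false)
        = (PySem.Str.slice row (some (j + 1)) none).toList.reverse.foldl rcStep true) := by
    intro k hk
    rw [hk]
    exact loopChars_foldl_reverse _
  rcases hcond with ⟨hj1, hpos⟩ | ⟨hjneg, hwlow, hneg⟩
  · rw [rcLoop_eq i (r0 :: rest) row (PySem.Str.len r0) hrow _ (j + 1) hj1 rfl]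
    rw [loopChars_take _ _ (by
      rcases hpos with h | h
      · exact Or.inl h
      · exact Or.inr h.1)]
    exact hsub0 (j + 1).toNat (by
      rw [PySem.Str.toList_slice, PySem.Chars.slice_eq_listSlice,
        PySem.List.slice_from _ hj1])
  · rw [hlenrow] at hwlow
    rw [rcLoop_eq_neg i (r0 :: rest) row (PySem.Str.len r0) hlen0 hrow _ (j + 1) hwlow hjneg rfl]
    rw [loopChars_append _ _ (by
      rw [hlenrow] at hneg
      rcases hneg with h | h
      · exact Or.inl h
      · exact Or.inr h.1)]
    refine hsub0 ((row.toList.length : Int) + (j + 1)).toNat ?_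
    rw [PySem.Str.toList_slice, PySem.Chars.slice_eq_listSlice,
      PySem.List.slice_some_none]
    rw [show j + 1 = -((((-(j + 1)).toNat : Nat)) : Int) by omega,
      PySem.List.clampIdx_neg_natCast _ _ (by omega)]
    congr 1
    omega
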